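-- pv_equiv track=rewrite | github.com/navnit3366/inventory-transfer-procedure-master | script.py | find_doc
-- ===== SOURCE A (Python) =====
-- def find_doc(lists3): #function to find doc values
-- 	doc = []
-- 	#consec[0] = '1'
-- 	i=0
-- 	for regis in lists3:
-- 		if regis == '1':
-- 			doc.append(str(i+1))
-- 			i=i+1
-- 		else:
-- 			doc.append(str(i))
-- 	return doc
-- ===== SOURCE B (Python) =====
-- def find_doc(lists3):
--     # B: seed with the total number of '1's, then walk RIGHT-TO-LEFT with a
--     # decrementing counter, building the labels back-to-front.
--     out = []
--     c = lists3.count('1')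
--     for s in reversed(lists3):
--         out.append(str(c))
--         if s == '1':
--             c -= 1
--     out.reverse()
--     return out
-- ===== Notes on version B (the rewrite author's own statement) =====
-- stated objective: alternative
-- what changed: Replaces A's forward loop with an incrementing counter by a reverse traversal: count all '1's once, then walk right-to-left decrementing the counter and build the output back-to-front.
import Mathlib
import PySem

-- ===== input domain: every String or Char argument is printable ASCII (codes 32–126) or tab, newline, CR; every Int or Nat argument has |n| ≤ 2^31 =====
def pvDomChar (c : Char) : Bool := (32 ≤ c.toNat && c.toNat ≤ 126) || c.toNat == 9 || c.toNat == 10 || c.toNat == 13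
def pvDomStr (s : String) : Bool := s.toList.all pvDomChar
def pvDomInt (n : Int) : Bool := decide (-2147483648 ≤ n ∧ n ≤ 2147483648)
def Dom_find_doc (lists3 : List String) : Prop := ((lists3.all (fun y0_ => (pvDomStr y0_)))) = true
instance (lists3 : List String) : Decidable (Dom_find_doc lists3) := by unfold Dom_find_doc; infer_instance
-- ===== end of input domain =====

-- ===== PORT A =====
-- B replaces A's forward loop with an incrementing counter by a total count followed by a
-- right-to-left pass with a decrementing counter, built back-to-front; same return value.
def find_doc (lists3 : List String) : List String :=
  (lists3.foldl
    (fun (st : List String × Int) regis =>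
      if regis == "1" then (st.1 ++ [PySem.Int.toStr (st.2 + 1)], st.2 + 1)
      else (st.1 ++ [PySem.Int.toStr st.2], st.2))
    ([], 0)).1

-- ===== PORT B =====
def find_doc_alt (lists3 : List String) : List String :=
  let c0 : Int := (PySem.List.count lists3 "1" : Int)
  let r := lists3.reverse.foldl
    (fun (st : List String × Int) s =>
      (st.1 ++ [PySem.Int.toStr st.2], if s == "1" then st.2 - 1 else st.2))
    ([], c0)
  r.1.reverse

-- ===== PRECONDITION & SPEC =====
def Spec_find_doc (lists3 : List String) (out : List String) : Prop := out = find_doc_alt lists3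
instance (lists3 : List String) (out : List String) : Decidable (Spec_find_doc lists3 out) := by unfold Spec_find_doc; infer_instance

-- ===== CLAIM (what is proved, stated in full; the proofs are below) =====
def Claim_equal_find_doc : Prop := ∀ (lists3 : List String), Dom_find_doc lists3 → Spec_find_doc lists3 (find_doc lists3)

-- ===== LEMMAS AND PROOFS =====


-- common recursive characterisation: labels with running counter c
def pvG (c : Int) : List String → List String
  | [] => []
  | x :: xs =>
    let c' := if x == "1" then c + 1 else c
    PySem.Int.toStr c' :: pvG c' xs

theorem pvA_fold (l : List String) : ∀ (acc : List String) (c : Int),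
    (l.foldl
      (fun (st : List String × Int) regis =>
        if regis == "1" then (st.1 ++ [PySem.Int.toStr (st.2 + 1)], st.2 + 1)
        else (st.1 ++ [PySem.Int.toStr st.2], st.2))
      (acc, c)).1 = acc ++ pvG c l := by
  induction l with
  | nil => intro acc c; simp [pvG]
  | cons x xs ih =>
    intro acc c
    rw [List.foldl_cons]
    by_cases h : (x == "1") = true
    · rw [if_pos h, ih]; simp [pvG, h]
    · rw [if_neg h, ih]; simp [pvG, h]

theorem pvB_rev (l : List String) : ∀ (acc : List String) (c : Int),
    l.reverse.foldl
      (fun (st : List String × Int) s =>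
        (st.1 ++ [PySem.Int.toStr st.2], if s == "1" then st.2 - 1 else st.2))
      (acc, c + (l.count "1" : Int)) = (acc ++ (pvG c l).reverse, c) := by
  induction l with
  | nil => intro acc c; simp [pvG]
  | cons x xs ih =>
    intro acc c
    rw [List.reverse_cons, List.foldl_append]
    by_cases h : (x == "1") = true
    · have hx : x = "1" := by simpa using h
      subst hx
      have hc : c + ((("1" : String) :: xs).count "1" : Int) = (c + 1) + (xs.count "1" : Int) := by
        rw [List.count_cons_self]; push_cast; ring
      rw [hc, ih]
      simp [pvG]
    · have hx : ¬ x = "1" := by simpa using h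
      have hc : c + ((x :: xs).count "1" : Int) = c + (xs.count "1" : Int) := by
        simp [hx]
      rw [hc, ih]
      simp [pvG, h, hx]

-- ===== VERDICT (by name: the statement is the Claim_ definition above) =====
theorem find_doc_spec : Claim_equal_find_doc := by
  intro lists3 _
  show find_doc lists3 = find_doc_alt lists3
  rw [find_doc, pvA_fold lists3 [] 0]
  have h := pvB_rev lists3 [] 0
  rw [zero_add] at h
  unfold find_doc_alt
  simp only [PySem.List.count_eq]
  rw [h]
  simp
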